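-- pv_equiv track=rewrite | github.com/SingTown/OpenMV-Robot-Arm-Project | openmv_examples/Problem E of the 2024/main.py | generate_centered_rois
-- ===== SOURCE A (Python) =====
-- ShiftX = 33
--
-- ShiftY = 1
--
-- def generate_centered_rois(width, height, b, k):
--     # 生成 3x3 九宫格的 ROI（感兴趣区域）
--     # 参数说明：width/height 为图像尺寸，b 为格子间距（distance），k 为格子大小（block）
--     rois = []
--     # 计算整个 3x3 矩阵的宽高（以像素计）
--     total_width = 3 * b
--     total_height = 3 * b
--
--     # 计算左上角起点，目的是让九宫格居中，再加上微调偏移量 ShiftX/ShiftY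
--     start_x = (width - total_width) // 2 + ShiftX
--     start_y = (height - total_height) // 2 + ShiftY
--
--     # 对每个格子计算其 ROI（x, y, w, h）并返回一个 3x3 的列表
--     for i in range(3):
--         row = []
--         for j in range(3):
--             x_center = start_x + j * b + b // 2
--             y_center = start_y + i * b + b // 2
--             x = x_center - k // 2
--             y = y_center - k // 2
--             row.append((x, y, k, k))
--         rois.append(row)
--
--     return rois
-- ===== SOURCE B (Python) =====
-- ShiftX = 33
--
-- ShiftY = 1
--
-- def generate_centered_rois(width, height, b, k):
--     # Compute only the top-left ROI from the centering formula, then derive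
--     # every other ROI by translation: each next cell is the previous one
--     # shifted by b in x, each next row is the previous row shifted by b in y.
--     x0 = (width - 3 * b) // 2 + ShiftX + b // 2 - k // 2
--     y0 = (height - 3 * b) // 2 + ShiftY + b // 2 - k // 2
--     row = [(x0, y0, k, k)]
--     for _ in range(2):
--         x, y, w, h = row[-1]
--         row.append((x + b, y, w, h))
--     rois = [row]
--     for _ in range(2):
--         rois.append([(x, y + b, w, h) for (x, y, w, h) in rois[-1]])
--     return rois
-- ===== Notes on version B (the rewrite author's own statement) =====
-- stated objective: alternative
-- what changed: B computes only the top-left ROI from the centering formula and derives all other cells by incremental translation (previous cell shifted by b in x, previous row shifted by b in y), instead of A's per-cell coordinate recomputation in nested loops.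
import Mathlib
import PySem

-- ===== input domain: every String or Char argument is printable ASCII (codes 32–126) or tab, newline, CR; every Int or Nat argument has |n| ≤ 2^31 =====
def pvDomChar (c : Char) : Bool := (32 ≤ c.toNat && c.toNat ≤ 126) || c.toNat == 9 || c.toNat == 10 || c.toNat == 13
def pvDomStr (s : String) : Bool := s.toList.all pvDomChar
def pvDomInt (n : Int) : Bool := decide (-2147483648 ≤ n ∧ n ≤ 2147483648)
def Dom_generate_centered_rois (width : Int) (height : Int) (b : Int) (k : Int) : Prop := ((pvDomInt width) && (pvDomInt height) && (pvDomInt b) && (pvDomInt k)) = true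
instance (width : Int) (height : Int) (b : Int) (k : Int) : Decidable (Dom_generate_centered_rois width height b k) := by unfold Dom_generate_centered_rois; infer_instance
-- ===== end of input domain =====

-- B computes only the top-left ROI and derives the rest by translation (cells shifted by b in x, rows by b in y); same values, different construction.
-- ===== PORT A =====
def generate_centered_rois (width : Int) (height : Int) (b : Int) (k : Int) : List (List (Int × Int × Int × Int)) :=
  let total_width := 3 * b
  let total_height := 3 * b
  let start_x := PySem.Int.floordiv (width - total_width) 2 + 33
  let start_y := PySem.Int.floordiv (height - total_height) 2 + 1
  (PySem.List.pyRange 0 3 1).foldl (fun rois i =>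
    let row := (PySem.List.pyRange 0 3 1).foldl (fun row j =>
      let x_center := start_x + j * b + PySem.Int.floordiv b 2
      let y_center := start_y + i * b + PySem.Int.floordiv b 2
      let x := x_center - PySem.Int.floordiv k 2
      let y := y_center - PySem.Int.floordiv k 2
      row ++ [(x, y, k, k)]) []
    rois ++ [row]) []

-- ===== PORT B =====
def generate_centered_rois_alt (width : Int) (height : Int) (b : Int) (k : Int) : List (List (Int × Int × Int × Int)) :=
  let x0 := PySem.Int.floordiv (width - 3 * b) 2 + 33 + PySem.Int.floordiv b 2 - PySem.Int.floordiv k 2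
  let y0 := PySem.Int.floordiv (height - 3 * b) 2 + 1 + PySem.Int.floordiv b 2 - PySem.Int.floordiv k 2
  let row := (PySem.List.pyRange 0 2 1).foldl (fun row _ =>
    match PySem.List.pyGet? row (-1) with   -- row[-1]; row is never empty
    | some (x, y, w, h) => row ++ [(x + b, y, w, h)]
    | none => row) [(x0, y0, k, k)]
  (PySem.List.pyRange 0 2 1).foldl (fun rois _ =>
    match PySem.List.pyGet? rois (-1) with  -- rois[-1]; rois is never empty
    | some r => rois ++ [r.map (fun t => (t.1, t.2.1 + b, t.2.2.1, t.2.2.2))]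
    | none => rois) [row]

-- ===== PRECONDITION & SPEC =====
def Spec_generate_centered_rois (width : Int) (height : Int) (b : Int) (k : Int) (out : List (List (Int × Int × Int × Int))) : Prop := out = generate_centered_rois_alt width height b k
instance (width : Int) (height : Int) (b : Int) (k : Int) (out : List (List (Int × Int × Int × Int))) : Decidable (Spec_generate_centered_rois width height b k out) := by unfold Spec_generate_centered_rois; infer_instance

-- ===== CLAIM =====
def Claim_equal_generate_centered_rois : Prop := ∀ (width : Int) (height : Int) (b : Int) (k : Int), Dom_generate_centered_rois width height b k → Spec_generate_centered_rois width height b k (generate_centered_rois width height b k)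

-- ===== LEMMAS AND PROOFS =====

-- ===== VERDICT =====
theorem generate_centered_rois_spec : Claim_equal_generate_centered_rois := by
  intro width height b k _
  unfold Spec_generate_centered_rois generate_centered_rois generate_centered_rois_alt
  simp [PySem.List.pyRange, PySem.List.pyGet?, PySem.List.pyIdx?, List.range_succ]
  omega
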